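-- pv_equiv track=rewrite | github.com/PushkarPrabhath27/ResearchCrossPollinationEngine | hypothesis-engine/src/agents/resource_agent.py | _parse_protocols
-- ===== SOURCE A (Python) =====
-- from typing import List, Dict, Optional
--
-- def _parse_protocols(text: str) -> List[Dict]:
--     """Parse protocol information from text"""
--     protocols = []
--     lines = text.split('\n')
--
--     current_protocol = {}
--     for line in lines:
--         line = line.strip()
--
--         if 'title:' in line.lower():
--             if current_protocol:
--                 protocols.append(current_protocol)
--             current_protocol = {'title': line.split(':', 1)[-1].strip()}
--         elif current_protocol:
--             if 'source:' in line.lower():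
--                 current_protocol['source'] = line.split(':', 1)[-1].strip()
--             elif 'time:' in line.lower() or 'duration:' in line.lower():
--                 current_protocol['duration'] = line.split(':', 1)[-1].strip()
--             elif 'url:' in line.lower():
--                 current_protocol['url'] = line.split(':', 1)[-1].strip()
--
--     if current_protocol:
--         protocols.append(current_protocol)
--
--     return protocols[:8]
-- ===== SOURCE B (Python) =====
-- def _block_to_dict(block):
--     d = {'title': block[0].split(':', 1)[-1].strip()}
--     for ln in block[1:]:
--         low = ln.lower()
--         if 'source:' in low:
--             d['source'] = ln.split(':', 1)[-1].strip()
--         elif 'time:' in low or 'duration:' in low: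
--             d['duration'] = ln.split(':', 1)[-1].strip()
--         elif 'url:' in low:
--             d['url'] = ln.split(':', 1)[-1].strip()
--     return d
--
--
-- def _parse_protocols(text):
--     # phase 1: segment the stripped lines into blocks, one per 'title:' line
--     blocks = []
--     for ln in (raw.strip() for raw in text.split('\n')):
--         if 'title:' in ln.lower():
--             blocks.append([ln])
--         elif blocks:
--             blocks[-1].append(ln)
--     # phase 2: convert the first 8 blocks into dicts
--     return [_block_to_dict(b) for b in blocks[:8]]
-- ===== Notes on version B (the rewrite author's own statement) =====
-- stated objective: alternative
-- what changed: Replaces A's fused state-machine (protocols list + mutable current dict threaded through one loop, with a trailing flush) by two separate phases: first segment the stripped lines into blocks starting at each 'title:' line, then truncate to 8 blocks and map each block to its dict.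
import Mathlib
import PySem

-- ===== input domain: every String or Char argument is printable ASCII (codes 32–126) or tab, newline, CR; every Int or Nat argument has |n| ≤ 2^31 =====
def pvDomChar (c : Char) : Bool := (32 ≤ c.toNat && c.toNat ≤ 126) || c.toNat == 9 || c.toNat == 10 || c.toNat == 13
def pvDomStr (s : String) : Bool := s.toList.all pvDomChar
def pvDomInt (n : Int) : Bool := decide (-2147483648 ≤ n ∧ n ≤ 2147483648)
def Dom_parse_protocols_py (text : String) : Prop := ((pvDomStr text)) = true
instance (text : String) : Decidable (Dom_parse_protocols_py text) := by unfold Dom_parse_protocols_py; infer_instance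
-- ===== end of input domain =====

-- B is an alternative decomposition of A (segment-into-blocks phase, then a map phase),
-- proved to return the same value; neither is claimed faster.

-- shared low-level helpers (line predicates / field extraction, used verbatim by both Pythons)

-- 'title:' in line.lower()
def pvIsTitle (line : String) : Bool := PySem.Str.isIn "title:" (PySem.Str.lower line)

-- line.split(':', 1)[-1].strip()
def pvVal (line : String) : String :=
  PySem.Str.strip (((PySem.Str.splitMax? line ":" 1).getD [line]).getLastD line)

-- the source/time-duration/url elif cascade applied to a current dict (A) / block dict (B)
def pvStep (d : PySem.Dict String String) (line : String) : PySem.Dict String String :=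
  let low := PySem.Str.lower line
  if PySem.Str.isIn "source:" low then d.insert "source" (pvVal line)
  else if PySem.Str.isIn "time:" low || PySem.Str.isIn "duration:" low then d.insert "duration" (pvVal line)
  else if PySem.Str.isIn "url:" low then d.insert "url" (pvVal line)
  else d

-- ===== PORT A =====
-- A's loop body: strip the line, then the title test / elif chain over (protocols, current_protocol)
def pvALoop (st : List (PySem.Dict String String) × PySem.Dict String String) (rawline : String) :
    List (PySem.Dict String String) × PySem.Dict String String :=
  let line := PySem.Str.strip rawline
  if pvIsTitle line then
    ((if st.2.items.isEmpty then st.1 else st.1 ++ [st.2]),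
     (PySem.Dict.empty.insert "title" (pvVal line)))
  else if st.2.items.isEmpty then st
  else (st.1, pvStep st.2 line)

-- one fused loop carrying (protocols, current_protocol); trailing flush; protocols[:8]
def parse_protocols_py (text : String) : List (List (String × String)) :=
  let lines := (PySem.Str.split? text "\n").getD [text]
  let st := lines.foldl pvALoop ([], PySem.Dict.empty)
  let protocols := if st.2.items.isEmpty then st.1 else st.1 ++ [st.2]
  (PySem.List.slice protocols none (some 8)).map (·.items)

-- ===== PORT B =====
-- block[0] gives the title, block[1:] is classified by the cascade
def pvBlockToDict (block : List String) : PySem.Dict String String :=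
  block.tail.foldl pvStep (PySem.Dict.empty.insert "title" (pvVal (block.headD "")))

-- B's segmentation body: start a new block at a 'title:' line, else extend the last block
def pvBSeg (bs : List (List String)) (ln : String) : List (List String) :=
  if pvIsTitle ln then bs ++ [[ln]]
  else match bs.getLast? with
    | none => bs
    | some b => bs.dropLast ++ [b ++ [ln]]

-- phase 1: segment stripped lines into blocks at 'title:' lines; phase 2: map first 8 blocks
def parse_protocols_py_alt (text : String) : List (List (String × String)) :=
  let lines := (((PySem.Str.split? text "\n").getD [text]).map PySem.Str.strip)
  let blocks := lines.foldl pvBSeg []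
  (blocks.take 8).map (fun b => (pvBlockToDict b).items)

-- ===== PRECONDITION & SPEC =====
def Spec_parse_protocols_py (text : String) (out : List (List (String × String))) : Prop := out = parse_protocols_py_alt text
instance (text : String) (out : List (List (String × String))) : Decidable (Spec_parse_protocols_py text out) := by unfold Spec_parse_protocols_py; infer_instance

-- ===== CLAIM (what is proved, stated in full; the proofs are below) =====
def Claim_equal_parse_protocols_py : Prop := ∀ (text : String), Dom_parse_protocols_py text → Spec_parse_protocols_py text (parse_protocols_py text)

-- ===== LEMMAS AND PROOFS =====

-- A-state corresponding to B's block list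
def pvStateOf (bs : List (List String)) : List (PySem.Dict String String) × PySem.Dict String String :=
  match bs.getLast? with
  | none => ([], PySem.Dict.empty)
  | some b => (bs.dropLast.map pvBlockToDict, pvBlockToDict b)

theorem pvInsert_items_ne_nil {κ ν : Type} [BEq κ] [LawfulBEq κ] (d : PySem.Dict κ ν) (k : κ) (v : ν) :
    (d.insert k v).items ≠ [] := by
  rw [PySem.Dict.items_insert]
  split_ifs with h
  · intro hnil
    rw [List.map_eq_nil_iff] at hnil
    rw [PySem.Dict.contains_iff_mem_keys] at h
    simp [PySem.Dict.keys, hnil] at h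
  · simp

theorem pvStep_items_ne_nil (d : PySem.Dict String String) (line : String)
    (h : d.items ≠ []) : (pvStep d line).items ≠ [] := by
  unfold pvStep
  simp only []
  split_ifs <;> first | exact pvInsert_items_ne_nil _ _ _ | exact h

theorem pvFoldl_step_items_ne_nil (t : List String) (d : PySem.Dict String String)
    (h : d.items ≠ []) : (t.foldl pvStep d).items ≠ [] := by
  induction t generalizing d with
  | nil => exact h
  | cons x xs ih => exact ih _ (pvStep_items_ne_nil _ _ h)

theorem pvBlockToDict_items_ne_nil (b : List String) : (pvBlockToDict b).items ≠ [] := by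
  exact pvFoldl_step_items_ne_nil _ _ (pvInsert_items_ne_nil _ _ _)

theorem pvBlockToDict_append (b : List String) (hb : b ≠ []) (ln : String) :
    pvBlockToDict (b ++ [ln]) = pvStep (pvBlockToDict b) ln := by
  obtain ⟨h, t, rfl⟩ := List.exists_cons_of_ne_nil hb
  simp [pvBlockToDict, List.foldl_append]

theorem pvALoop_state (bs : List (List String)) (hbs : ∀ b ∈ bs, b ≠ []) (l : String) :
    pvALoop (pvStateOf bs) l = pvStateOf (pvBSeg bs (PySem.Str.strip l)) := by
  unfold pvALoop pvBSeg
  simp only []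
  set ln := PySem.Str.strip l with hln
  rcases List.eq_nil_or_concat bs with rfl | ⟨bs₀, b, rfl⟩
  · by_cases ht : pvIsTitle ln
    · simp [ht, pvStateOf, pvBlockToDict, PySem.Dict.empty]
    · simp [ht, pvStateOf, PySem.Dict.empty]
  · have hb : b ≠ [] := hbs b (by simp)
    have hcur : (pvStateOf (bs₀ ++ [b])).2 = pvBlockToDict b := by simp [pvStateOf]
    have hne : (pvStateOf (bs₀ ++ [b])).2.items.isEmpty = false := by
      rw [hcur]; simpa using pvBlockToDict_items_ne_nil b
    have hne' := pvBlockToDict_items_ne_nil b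
    by_cases ht : pvIsTitle ln
    · simp only [ht, if_true]
      simp [pvStateOf, pvBlockToDict]
      simpa [pvBlockToDict] using hne'
    · simp only [ht]
      simp [pvStateOf, hne', pvBlockToDict_append b hb ln]

theorem pvBSeg_inv (bs : List (List String)) (hbs : ∀ b ∈ bs, b ≠ []) (ln : String) :
    ∀ b ∈ pvBSeg bs ln, b ≠ [] := by
  unfold pvBSeg
  split_ifs with ht
  · intro x hx
    rcases (by simpa using hx : x ∈ bs ∨ x = [ln]) with h | rfl
    · exact hbs x h
    · simp
  · rcases List.eq_nil_or_concat bs with rfl | ⟨bs₀, b, rfl⟩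
    · simp
    · rw [show (bs₀.concat b).getLast? = some b from by simp]
      intro x hx
      rcases (by simpa using hx : x ∈ bs₀ ∨ x = b ++ [ln]) with h | rfl
      · exact hbs x (by simp [h])
      · simp

theorem pvMain (ls : List String) (bs : List (List String)) (hbs : ∀ b ∈ bs, b ≠ []) :
    ls.foldl pvALoop (pvStateOf bs) = pvStateOf ((ls.map PySem.Str.strip).foldl pvBSeg bs) := by
  induction ls generalizing bs with
  | nil => rfl
  | cons l ls ih =>
    simp only [List.foldl_cons, List.map_cons]
    rw [pvALoop_state bs hbs l]
    exact ih _ (pvBSeg_inv bs hbs _)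

-- ===== VERDICT (by name: the statement is the Claim_ definition above) =====
theorem parse_protocols_py_spec : Claim_equal_parse_protocols_py := by
  intro text _
  unfold Spec_parse_protocols_py parse_protocols_py parse_protocols_py_alt
  simp only []
  set lines := (PySem.Str.split? text "\n").getD [text] with hlines
  have h0 : (([], PySem.Dict.empty) : List (PySem.Dict String String) × PySem.Dict String String)
      = pvStateOf [] := rfl
  rw [h0, pvMain lines [] (by simp)]
  set blocks := (lines.map PySem.Str.strip).foldl pvBSeg [] with hblocks
  rw [show (8 : Int) = ((8 : Nat) : Int) from rfl, PySem.List.slice_to_natCast]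
  rcases List.eq_nil_or_concat blocks with hnil | ⟨bs₀, b, hcat⟩
  · simp [hnil, pvStateOf, PySem.Dict.empty]
  · have hne := pvBlockToDict_items_ne_nil b
    have hst : pvStateOf blocks = (bs₀.map pvBlockToDict, pvBlockToDict b) := by
      rw [hcat]; unfold pvStateOf
      rw [show (bs₀.concat b).getLast? = some b from by simp]
      simp
    rw [hst]
    rw [if_neg (by simpa using hne)]
    have hmap : bs₀.map pvBlockToDict ++ [pvBlockToDict b] = blocks.map pvBlockToDict := by
      rw [hcat]; simp
    rw [hmap, ← List.map_take]
    simp [List.map_map, Function.comp_def]
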